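-- pv_equiv track=rewrite | github.com/mikegorski/Advent-of-Code-2022 | day1/day1_task1.py | return_total_list
-- ===== SOURCE A (Python) =====
-- def return_total_list(list):
--     total = 0
--     total_list = []
--     for value in list:
--         if value != 0:
--             total += value
--         else:
--             total_list.append(total)
--             total = 0
--     total_list.append(total)
--     total_list.sort(reverse=True)
--     return total_list
-- ===== SOURCE B (Python) =====
-- def return_total_list(list):
--     groups = [[]]
--     for value in list:
--         if value == 0:
--             groups.append([])
--         else:
--             groups[-1].append(value)
--     sums = [sum(g) for g in groups]
--     sums.sort(reverse=True)
--     return sums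
-- ===== Notes on version B (the rewrite author's own statement) =====
-- stated objective: alternative
-- what changed: B partitions the input into zero-separated sublists in one pass (maintaining a list of groups instead of a running integer), then sums each group in a separate pass before sorting; A interleaves accumulation and emission with a running total.
import Mathlib
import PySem

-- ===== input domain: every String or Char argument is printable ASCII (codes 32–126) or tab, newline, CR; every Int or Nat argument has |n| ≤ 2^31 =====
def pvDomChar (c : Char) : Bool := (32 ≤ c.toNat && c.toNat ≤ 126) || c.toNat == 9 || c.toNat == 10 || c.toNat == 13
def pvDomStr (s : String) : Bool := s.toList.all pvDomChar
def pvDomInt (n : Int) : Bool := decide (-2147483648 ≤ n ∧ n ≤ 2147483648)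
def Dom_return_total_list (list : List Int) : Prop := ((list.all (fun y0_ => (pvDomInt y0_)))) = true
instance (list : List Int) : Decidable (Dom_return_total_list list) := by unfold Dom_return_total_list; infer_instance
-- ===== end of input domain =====

-- B partitions into zero-separated sublists first and sums them in a second pass; an alternative decomposition of A's single running-total loop.

-- ===== PORT A =====
-- loop state: (total, total_list)
def return_total_list (list : List Int) : List Int :=
  let s := list.foldl (fun (s : Int × List Int) value =>
    if value ≠ 0 then (s.1 + value, s.2) else (0, s.2 ++ [s.1])) (0, [])
  PySem.List.sorted (s.2 ++ [s.1]) (fun x => x) true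

-- ===== PORT B =====
-- groups[-1].append(value): append to the last sublist
def pvAppendLast : List (List Int) → Int → List (List Int)
  | [], v => [[v]]
  | [g], v => [g ++ [v]]
  | g :: gs, v => g :: pvAppendLast gs v

def return_total_list_alt (list : List Int) : List Int :=
  let groups := list.foldl (fun gs value =>
    if value == 0 then gs ++ [[]] else pvAppendLast gs value) [[]]
  PySem.List.sorted (groups.map (fun g => g.sum)) (fun x => x) true

-- ===== PRECONDITION & SPEC =====
def Spec_return_total_list (list : List Int) (out : List Int) : Prop := out = return_total_list_alt list
instance (list : List Int) (out : List Int) : Decidable (Spec_return_total_list list out) := by unfold Spec_return_total_list; infer_instance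

-- ===== CLAIM (what is proved, stated in full; the proofs are below) =====
def Claim_equal_return_total_list : Prop := ∀ (list : List Int), Dom_return_total_list list → Spec_return_total_list list (return_total_list list)

-- ===== LEMMAS AND PROOFS =====
theorem pvAppendLast_concat (gs : List (List Int)) (cur : List Int) (v : Int) :
    pvAppendLast (gs ++ [cur]) v = gs ++ [cur ++ [v]] := by
  induction gs with
  | nil => rfl
  | cons g gs ih =>
    cases gs with
    | nil => simp [pvAppendLast]
    | cons h t => simp [pvAppendLast] at ih ⊢; exact ih

theorem loop_agree (l : List Int) : ∀ (gs : List (List Int)) (cur : List Int),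
    (l.foldl (fun gs value => if value == 0 then gs ++ [[]] else pvAppendLast gs value)
        (gs ++ [cur])).map (fun g => g.sum)
      = (l.foldl (fun (s : Int × List Int) value =>
          if value ≠ 0 then (s.1 + value, s.2) else (0, s.2 ++ [s.1]))
          (cur.sum, gs.map (fun g => g.sum))).2
        ++ [(l.foldl (fun (s : Int × List Int) value =>
          if value ≠ 0 then (s.1 + value, s.2) else (0, s.2 ++ [s.1]))
          (cur.sum, gs.map (fun g => g.sum))).1] := by
  induction l with
  | nil => intro gs cur; simp
  | cons v l ih =>
    intro gs cur
    by_cases hv : v = 0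
    · subst hv
      simp only [List.foldl_cons, beq_self_eq_true, if_true]
      have := ih (gs ++ [cur]) []
      simp only [List.append_assoc, List.map_append, List.map_cons, List.map_nil,
        List.sum_nil] at this ⊢
      simpa using this
    · simp only [List.foldl_cons, beq_iff_eq, if_neg hv]
      rw [pvAppendLast_concat]
      have := ih gs (cur ++ [v])
      simp only [List.sum_append, List.sum_cons, List.sum_nil, add_zero] at this ⊢
      simpa [hv] using this

-- ===== VERDICT (by name: the statement is the Claim_ definition above) =====
theorem return_total_list_spec : Claim_equal_return_total_list := by
  intro list _
  unfold Spec_return_total_list return_total_list return_total_list_alt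
  have := loop_agree list [] []
  simp only [List.nil_append, List.map_nil, List.sum_nil] at this
  simp only []
  rw [this]
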